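-- pv_equiv track=rewrite | github.com/kstauch/RLE-Encoding | P2_C.py | to_rle_string
-- ===== SOURCE A (Python) =====
-- def to_rle_string(rle_data):
--     dec_to_hex_dict = {15: 'f', 14: 'e', 13: 'd', 12: 'c', 11: 'b', 10: 'a'}
--     result = ''
--     end_of_list = False
--     for index, element in enumerate(rle_data):
--         if index == len(rle_data) - 1:  # to not add delimiter to end of string
--             end_of_list = True
--         if index % 2 == 0:  # every odd element (run length)
--             result += str(element)
--         else:  # every even element (run value)
--             if element >= 10:
--                 result += dec_to_hex_dict[element]
--             else:
--                 result += str(element)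
--             if end_of_list is False:
--                 result += ":"
--
--     return result
-- ===== SOURCE B (Python) =====
-- def to_rle_string(rle_data):
--     hexmap = {10: 'a', 11: 'b', 12: 'c', 13: 'd', 14: 'e', 15: 'f'}
--
--     def token(value):
--         return hexmap[value] if value >= 10 else str(value)
--
--     tokens = []
--     i = 0
--     while i + 1 < len(rle_data):
--         tokens.append(str(rle_data[i]) + token(rle_data[i + 1]))
--         i += 2
--     if i < len(rle_data):
--         tokens.append(str(rle_data[i]))
--     return ':'.join(tokens)
-- ===== Notes on version B (the rewrite author's own statement) =====
-- stated objective: idiomatic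
-- what changed: Replaces the flat enumerate loop with parity tests, end-of-list flag and incremental ':' appends by a pairwise traversal that builds one token per (length, value) pair (plus the trailing unpaired length) and joins them with ':'.join.
import Mathlib
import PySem

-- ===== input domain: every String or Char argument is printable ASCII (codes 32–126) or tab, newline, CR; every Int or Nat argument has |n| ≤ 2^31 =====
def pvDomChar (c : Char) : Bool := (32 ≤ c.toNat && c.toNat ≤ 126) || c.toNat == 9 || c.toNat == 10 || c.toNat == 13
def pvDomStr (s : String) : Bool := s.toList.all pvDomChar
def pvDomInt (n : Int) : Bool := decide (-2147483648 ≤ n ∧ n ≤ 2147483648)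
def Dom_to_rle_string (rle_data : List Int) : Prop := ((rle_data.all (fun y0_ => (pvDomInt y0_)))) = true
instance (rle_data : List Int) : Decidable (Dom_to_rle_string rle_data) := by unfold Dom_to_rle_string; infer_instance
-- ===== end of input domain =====

-- B replaces A's flat enumerate/parity/end-of-list loop by a pairwise token list joined with ':' (idiomatic; same O(n) cost).

-- ===== PORT A =====
-- the dict lookup raises KeyError for a value ≥ 16; inside Pre_ it always hits, so the .getD "" default is never taken
def to_rle_string (rle_data : List Int) : String :=
  let dec_to_hex_dict : PySem.Dict Int String :=
    PySem.Dict.ofList [(15, "f"), (14, "e"), (13, "d"), (12, "c"), (11, "b"), (10, "a")]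
  let st :=
    (PySem.List.enumerate rle_data 0).foldl
      (fun (st : String × Bool) (p : Int × Int) =>
        let end_of_list := if p.1 = (rle_data.length : Int) - 1 then true else st.2
        if PySem.Int.mod p.1 2 = 0 then
          (st.1 ++ PySem.Int.toStr p.2, end_of_list)
        else
          let r := st.1 ++ (if p.2 ≥ 10 then (PySem.Dict.get? dec_to_hex_dict p.2).getD "" else PySem.Int.toStr p.2)
          (if end_of_list = false then r ++ ":" else r, end_of_list))
      ("", false)
  st.1

-- ===== PORT B =====
-- Source B's token helper; hexmap[value] raises KeyError for value ≥ 16, excluded by Pre_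
def pvHexTok (v : Int) : String :=
  let hexmap : PySem.Dict Int String :=
    PySem.Dict.ofList [(10, "a"), (11, "b"), (12, "c"), (13, "d"), (14, "e"), (15, "f")]
  if v ≥ 10 then (PySem.Dict.get? hexmap v).getD "" else PySem.Int.toStr v

-- structural port of Source B's while loop: each iteration consumes the next (length, value) pair,
-- the trailing `if i < len` appends the single left-over run length
def pvTokens : List Int → List String
  | l :: v :: rest => (PySem.Int.toStr l ++ pvHexTok v) :: pvTokens rest
  | [l] => [PySem.Int.toStr l]
  | [] => []

def to_rle_string_alt (rle_data : List Int) : String :=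
  PySem.Str.join ":" (pvTokens rle_data)

-- ===== PRECONDITION & SPEC =====
-- Pre_ excludes exactly the inputs with a run value ≥ 16 at an odd index: there A's dict lookup raises KeyError (B raises too).
def Pre_to_rle_string (rle_data : List Int) : Prop :=
  ∀ p ∈ PySem.List.enumerate rle_data 0, PySem.Int.mod p.1 2 = 1 → p.2 < 16
instance (rle_data : List Int) : Decidable (Pre_to_rle_string rle_data) := by unfold Pre_to_rle_string; infer_instance

def pvWitness_to_rle_string : List Int := [3, 12, 4, 5, 7]

def Spec_to_rle_string (rle_data : List Int) (out : String) : Prop := out = to_rle_string_alt rle_data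
instance (rle_data : List Int) (out : String) : Decidable (Spec_to_rle_string rle_data out) := by unfold Spec_to_rle_string; infer_instance

-- ===== CLAIM (what is proved, stated in full; the proofs are below) =====
def Claim_equal_to_rle_string : Prop := ∀ (rle_data : List Int), Dom_to_rle_string rle_data → Pre_to_rle_string rle_data → Spec_to_rle_string rle_data (to_rle_string rle_data)

-- ===== LEMMAS AND PROOFS =====

-- A's loop body with the total length abstracted as N (definitionally the lambda inside to_rle_string)
def stepA (N : Int) (st : String × Bool) (p : Int × Int) : String × Bool :=
  let dec_to_hex_dict : PySem.Dict Int String :=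
    PySem.Dict.ofList [(15, "f"), (14, "e"), (13, "d"), (12, "c"), (11, "b"), (10, "a")]
  let end_of_list := if p.1 = N - 1 then true else st.2
  if PySem.Int.mod p.1 2 = 0 then
    (st.1 ++ PySem.Int.toStr p.2, end_of_list)
  else
    let r := st.1 ++ (if p.2 ≥ 10 then (PySem.Dict.get? dec_to_hex_dict p.2).getD "" else PySem.Int.toStr p.2)
    (if end_of_list = false then r ++ ":" else r, end_of_list)

theorem to_rle_string_eq_stepA (xs : List Int) :
    to_rle_string xs = ((PySem.List.enumerate xs 0).foldl (stepA (xs.length : Int)) ("", false)).1 := rfl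

theorem hx_eq (v : Int) (hv : v < 16) :
    (if v ≥ 10 then
      (PySem.Dict.get? (PySem.Dict.ofList [(15, "f"), (14, "e"), (13, "d"), (12, "c"), (11, "b"), (10, "a")]) v).getD ""
     else PySem.Int.toStr v) = pvHexTok v := by
  unfold pvHexTok
  by_cases h : 10 ≤ v
  · simp only [ge_iff_le, h, if_pos]
    interval_cases v <;> decide
  · simp only [ge_iff_le, h, if_false]

theorem pvTokens_ne_nil (xs : List Int) (h : xs ≠ []) : pvTokens xs ≠ [] := by
  match xs with
  | [] => exact absurd rfl h
  | [l] => simp [pvTokens]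
  | l :: v :: rest => simp [pvTokens]

theorem loopA_go (xs : List Int) : ∀ (N i : Int) (res : String),
    (∀ p ∈ PySem.List.enumerate xs i, PySem.Int.mod p.1 2 = 1 → p.2 < 16) →
    0 ≤ i → i % 2 = 0 → N = i + xs.length →
    (((PySem.List.enumerate xs i).foldl (stepA N) (res, false)).1).toList
      = res.toList ++ PySem.Chars.join [':'] ((pvTokens xs).map String.toList) := by
  induction xs using pvTokens.induct with
  | case1 l v rest ih =>
    intro N i res hpre hi hpar hN
    simp only [List.length_cons] at hN
    have hN' : N = i + 2 + (rest.length : Int) := by push_cast at hN; omega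
    have hmodi : PySem.Int.mod i 2 = 0 := by
      rw [PySem.Int.mod_eq_emod_of_pos (by norm_num)]; exact hpar
    have hmodi1 : ¬ PySem.Int.mod (i + 1) 2 = 0 := by
      rw [PySem.Int.mod_eq_emod_of_pos (by norm_num)]; omega
    have hmodi1' : PySem.Int.mod (i + 1) 2 = 1 := by
      rw [PySem.Int.mod_eq_emod_of_pos (by norm_num)]; omega
    have h1 : ¬ (i = N - 1) := by omega
    have hv : v < 16 := by
      refine hpre (i + 1, v) ?_ hmodi1'
      rw [PySem.List.enumerate_cons, PySem.List.enumerate_cons]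
      simp [List.mem_cons]
    rw [PySem.List.enumerate_cons, PySem.List.enumerate_cons]
    simp only [List.foldl_cons]
    have e1 : stepA N (res, false) (i, l) = (res ++ PySem.Int.toStr l, false) := by
      simp only [stepA, if_pos hmodi, if_neg h1]
    rw [e1]
    by_cases hrest : rest = []
    · subst hrest
      simp only [List.length_nil, Nat.cast_zero, add_zero] at hN'
      have h2 : i + 1 = N - 1 := by omega
      have e2 : stepA N (res ++ PySem.Int.toStr l, false) (i + 1, v)
          = (res ++ PySem.Int.toStr l ++ pvHexTok v, true) := by
        simp only [stepA, if_neg hmodi1, if_pos h2, hx_eq v hv]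
        simp
      rw [e2]
      simp [PySem.List.enumerate_nil, pvTokens, PySem.Chars.join_singleton, List.append_assoc]
    · have hr1 : rest.length ≠ 0 := fun hc => hrest (List.length_eq_zero_iff.mp hc)
      have h2 : ¬ (i + 1 = N - 1) := by omega
      have e2 : stepA N (res ++ PySem.Int.toStr l, false) (i + 1, v)
          = (res ++ PySem.Int.toStr l ++ pvHexTok v ++ ":", false) := by
        simp only [stepA, if_neg hmodi1, if_neg h2, hx_eq v hv]
        simp
      rw [e2]
      have hadd : i + 1 + 1 = i + 2 := by ring
      rw [hadd]
      have hpre' : ∀ p ∈ PySem.List.enumerate rest (i + 2), PySem.Int.mod p.1 2 = 1 → p.2 < 16 := by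
        intro p hp hm
        refine hpre p ?_ hm
        rw [PySem.List.enumerate_cons, PySem.List.enumerate_cons, hadd]
        simp [List.mem_cons, hp]
      have ihr := ih N (i + 2) (res ++ PySem.Int.toStr l ++ pvHexTok v ++ ":") hpre'
        (by omega) (by omega) (by omega)
      rw [ihr]
      obtain ⟨q, ts, hq⟩ : ∃ q ts, pvTokens rest = q :: ts := by
        cases h' : pvTokens rest with
        | nil => exact absurd h' (pvTokens_ne_nil rest hrest)
        | cons q ts => exact ⟨q, ts, rfl⟩
      show _ = res.toList ++ PySem.Chars.join [':'] ((pvTokens (l :: v :: rest)).map String.toList)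
      rw [show pvTokens (l :: v :: rest) = (PySem.Int.toStr l ++ pvHexTok v) :: pvTokens rest from rfl, hq]
      simp only [List.map_cons, PySem.Chars.join_cons_cons, String.toList_append]
      have hcolon : (":" : String).toList = [':'] := rfl
      simp [hcolon, List.append_assoc]
  | case2 l =>
    intro N i res hpre hi hpar hN
    simp only [List.length_cons, List.length_nil] at hN
    have hN' : N = i + 1 := by push_cast at hN; omega
    have hmodi : PySem.Int.mod i 2 = 0 := by
      rw [PySem.Int.mod_eq_emod_of_pos (by norm_num)]; exact hpar
    have h1 : i = N - 1 := by omega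
    rw [PySem.List.enumerate_cons, PySem.List.enumerate_nil]
    simp only [List.foldl_cons, List.foldl_nil]
    have e1 : stepA N (res, false) (i, l) = (res ++ PySem.Int.toStr l, true) := by
      simp only [stepA, if_pos hmodi, if_pos h1]
    rw [e1]
    simp [pvTokens, PySem.Chars.join_singleton]
  | case3 =>
    intro N i res hpre hi hpar hN
    simp [PySem.List.enumerate_nil, pvTokens, PySem.Chars.join_nil]

-- ===== VERDICT (by name: the statement is the Claim_ definition above) =====
theorem to_rle_string_spec : Claim_equal_to_rle_string := by
  intro rle_data hdom hpre
  unfold Spec_to_rle_string to_rle_string_alt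
  apply String.toList_inj.mp
  rw [to_rle_string_eq_stepA]
  rw [loopA_go rle_data ((rle_data.length : Int)) 0 "" hpre (le_refl 0) rfl (by omega)]
  rw [PySem.Str.toList_join]
  rfl
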